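-- pv_equiv track=rewrite | github.com/TaehwanAN/CodingStudy | 프로그래머스/1/140108. 문자열 나누기/문자열 나누기.py | solution
-- ===== SOURCE A (Python) =====
-- def solution(s):
--     answer = 0
--     count=0
--     x=''
--     for i,v in enumerate(s):
--         if count==0:
--             answer+=1
--             x=v
--         if x==v:
--             count+=1
--         else:
--             count-=1
--
--     return answer
-- ===== SOURCE B (Python) =====
-- def solution(s):
--     # Segment-seeking search: instead of maintaining any per-character counter,
--     # the end of each segment is found by testing candidate even endpoints q with
--     # the closed-form balance test 2 * s.count(x, p, q) == q - p (matches == half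
--     # the window); no running state is carried across characters.
--     answer = 0
--     n = len(s)
--     p = 0
--     while p < n:
--         answer += 1
--         x = s[p]
--         p = next((q for q in range(p + 2, n + 1, 2)
--                   if 2 * s.count(x, p, q) == q - p), n)
--     return answer
-- ===== Notes on version B (the rewrite author's own statement) =====
-- stated objective: alternative
-- what changed: A maintains a signed per-character counter that is reset at zero; B carries no per-character state at all: for each segment it searches candidate even endpoints q and tests the closed-form balance condition 2*s.count(x,p,q) == q-p with the library count over the window, then jumps p to the found endpoint.
import Mathlib
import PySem

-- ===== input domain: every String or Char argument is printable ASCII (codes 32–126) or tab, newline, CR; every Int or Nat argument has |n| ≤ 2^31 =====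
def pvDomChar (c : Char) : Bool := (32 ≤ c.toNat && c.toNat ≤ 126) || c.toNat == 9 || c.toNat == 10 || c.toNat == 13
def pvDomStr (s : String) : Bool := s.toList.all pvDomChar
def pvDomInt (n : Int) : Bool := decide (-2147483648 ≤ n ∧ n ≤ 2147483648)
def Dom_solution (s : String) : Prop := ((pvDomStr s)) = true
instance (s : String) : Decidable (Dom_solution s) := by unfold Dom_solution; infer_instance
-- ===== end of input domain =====

-- B replaces A's maintained signed counter by a stateless endpoint search: each segment end is found by testing even endpoints with the balance test 2*count(x, window) == window length (alternative decomposition, not faster).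


-- ===== PORT A =====
-- one loop step of A: state (answer, count, x)
def stepA (st : Int × Int × Char) (v : Char) : Int × Int × Char :=
  let a := if st.2.1 = 0 then st.1 + 1 else st.1
  let x := if st.2.1 = 0 then v else st.2.2
  if x = v then (a, st.2.1 + 1, x) else (a, st.2.1 - 1, x)

-- Python's initial x = '' is overwritten before any comparison (count starts at 0); ' ' is an unused placeholder
def solution (s : String) : Int :=
  (s.toList.foldl stepA (0, 0, ' ')).1

-- ===== PORT B =====
-- the generator scan: next((q for q in range(p+2, n+1, 2) if 2*s.count(x,p,q) == q-p), n);
-- s.count(x, p, q) is exactly ((l.drop p).take (q-p)).count x for the 0 ≤ p, q ≤ n reached here;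
-- fuel (called with n + 1, more than the scan can take) only makes the recursion structural
def scanQ (l : List Char) (x : Char) (n p : Nat) : Nat → Nat → Nat
  | 0, _ => n
  | fuel + 1, q =>
    if q ≤ n then
      if 2 * (((l.drop p).take (q - p)).count x) = q - p then q
      else scanQ l x n p fuel (q + 2)
    else n

-- B's while loop over the start index p (x = s[p], in range since p < n);
-- fuel (called with n + 1, more than the loop can iterate) only makes the recursion structural
def solveLoop (l : List Char) (n : Nat) : Nat → Nat → Int → Int
  | 0, _, answer => answer
  | fuel + 1, p, answer =>
    if p < n then
      solveLoop l n fuel (scanQ l (l.getD p ' ') n p (n + 1) (p + 2)) (answer + 1)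
    else answer

def solution_alt (s : String) : Int :=
  solveLoop s.toList s.toList.length (s.toList.length + 1) 0 0

-- ===== PRECONDITION & SPEC =====
def Spec_solution (s : String) (out : Int) : Prop := out = solution_alt s
instance (s : String) (out : Int) : Decidable (Spec_solution s out) := by unfold Spec_solution; infer_instance

-- ===== CLAIM (what is proved, stated in full; the proofs are below) =====
def Claim_equal_solution : Prop := ∀ (s : String), Dom_solution s → Spec_solution s (solution s)

-- ===== LEMMAS AND PROOFS =====

-- intermediate description of A's behaviour: segment decomposition with a consuming inner loop
def segLoop (x : Char) (same diff : Int) : List Char → List Char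
  | [] => []
  | v :: rest =>
    let same' := if v = x then same + 1 else same
    let diff' := if v = x then diff else diff + 1
    if same' = diff' then rest else segLoop x same' diff' rest

theorem segLoop_length (x : Char) (same diff : Int) (l : List Char) :
    (segLoop x same diff l).length ≤ l.length := by
  induction l generalizing same diff with
  | nil => simp [segLoop]
  | cons v rest ih =>
    simp only [segLoop]
    split_ifs with h1 h2 h3
    · simp
    · exact (ih _ _).trans (Nat.le_succ _)
    · simp
    · exact (ih _ _).trans (Nat.le_succ _)

def outerB : List Char → Int
  | [] => 0
  | v :: rest => 1 + outerB (segLoop v 1 0 rest)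
termination_by l => l.length
decreasing_by
  exact Nat.lt_succ_of_le (segLoop_length v 1 0 rest)

theorem stepA_zero (a : Int) (x0 v : Char) : stepA (a, 0, x0) v = (a + 1, 1, v) := by
  simp [stepA]

theorem stepA_match (a c : Int) (x v : Char) (hc : c ≠ 0) (h : v = x) :
    stepA (a, c, x) v = (a, c + 1, x) := by
  simp [stepA, hc, h]

theorem stepA_mismatch (a c : Int) (x v : Char) (hc : c ≠ 0) (h : ¬ v = x) :
    stepA (a, c, x) v = (a, c - 1, x) := by
  have h' : ¬ x = v := fun e => h e.symm
  simp [stepA, hc, h']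

theorem segLoop_cons_match (x v : Char) (same diff : Int) (rest : List Char) (h : v = x) :
    segLoop x same diff (v :: rest) =
      if same + 1 = diff then rest else segLoop x (same + 1) diff rest := by
  simp [segLoop, h]

theorem segLoop_cons_mismatch (x v : Char) (same diff : Int) (rest : List Char) (h : ¬ v = x) :
    segLoop x same diff (v :: rest) =
      if same = diff + 1 then rest else segLoop x same (diff + 1) rest := by
  simp [segLoop, h]

-- A-side: A's fold, started at a segment boundary (count = 0), counts outerB;
-- mid-segment (count = same - diff ≠ 0) it counts the segments of what segLoop leaves.
theorem foldA_outerB : ∀ n (l : List Char), l.length ≤ n →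
    ((∀ a x0, (List.foldl stepA (a, 0, x0) l).1 = a + outerB l) ∧
     (∀ a x same diff, same ≠ diff →
        (List.foldl stepA (a, same - diff, x) l).1 = a + outerB (segLoop x same diff l))) := by
  intro n
  induction n with
  | zero =>
    intro l hl
    have : l = [] := List.eq_nil_of_length_eq_zero (Nat.le_zero.mp hl)
    subst this
    constructor
    · intro a x0; simp [outerB]
    · intro a x same diff _; simp [segLoop, outerB]
  | succ n ih =>
    intro l hl
    constructor
    · intro a x0
      cases l with
      | nil => simp [outerB]
      | cons v rest =>
        have hr : rest.length ≤ n := by simpa using hl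
        rw [List.foldl_cons, stepA_zero]
        have hseg := (ih rest hr).2 (a + 1) v 1 0 (by norm_num)
        rw [show (1 : Int) - 0 = 1 by ring] at hseg
        rw [hseg, outerB]; ring
    · intro a x same diff hne
      cases l with
      | nil => simp [segLoop, outerB]
      | cons v rest =>
        have hr : rest.length ≤ n := by simpa using hl
        have hc : same - diff ≠ 0 := sub_ne_zero.mpr hne
        by_cases hvx : v = x
        · rw [List.foldl_cons, stepA_match a _ x v hc hvx, segLoop_cons_match x v same diff rest hvx]
          by_cases hend : same + 1 = diff
          · rw [if_pos hend, show same - diff + 1 = 0 by omega]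
            exact (ih rest hr).1 a x
          · rw [if_neg hend, show same - diff + 1 = (same + 1) - diff by ring]
            exact (ih rest hr).2 a x (same + 1) diff (by omega)
        · rw [List.foldl_cons, stepA_mismatch a _ x v hc hvx, segLoop_cons_mismatch x v same diff rest hvx]
          by_cases hend : same = diff + 1
          · rw [if_pos hend, show same - diff - 1 = 0 by omega]
            exact (ih rest hr).1 a x
          · rw [if_neg hend, show same - diff - 1 = same - (diff + 1) by ring]
            exact (ih rest hr).2 a x same (diff + 1) (by omega)

-- the scan result never falls below min q n
theorem scanQ_lb (l : List Char) (x : Char) (n p : Nat) :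
    ∀ fuel q, min q n ≤ scanQ l x n p fuel q := by
  intro fuel
  induction fuel with
  | zero => intro q; rw [scanQ]; omega
  | succ fuel ih =>
    intro q
    rw [scanQ]
    split
    · split
      · omega
      · have := ih (q + 2); omega
    · omega

-- B-side: extending the counting window by one character
theorem cnt_ext (l : List Char) (x : Char) (p q : Nat) (hp : p ≤ q) (hq : q < l.length) :
    ((l.drop p).take (q + 1 - p)).count x =
      ((l.drop p).take (q - p)).count x + (if l[q] = x then 1 else 0) := by
  have h1 : q + 1 - p = (q - p) + 1 := by omega
  have h2 : (l.drop p)[q - p]? = l[q]? := by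
    rw [List.getElem?_drop]; congr 1; omega
  rw [h1, List.take_add_one, List.count_append, h2, List.getElem?_eq_getElem hq]
  by_cases hx : l[q] = x <;> simp [hx]


-- the even-offset step inside a segment: the break test cannot fire (odd balance), so
-- segLoop consumes one more character and the induction hypothesis applies at q + 2
theorem seg_scan_even (l : List Char) (x : Char) (p k : Nat)
    (ih : ∀ q (same diff : Int) fuel, l.length - q ≤ k → p < q → q ≤ l.length → (q - p) % 2 = 1 →
      same - diff = 2 * (((l.drop p).take (q - p)).count x : Int) - ((q : Int) - p) →
      l.length < q + fuel →
      segLoop x same diff (l.drop q) = l.drop (scanQ l x l.length p fuel (q + 1)))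
    (q : Nat) (same' diff' : Int) (f : Nat) (hk : l.length - q ≤ k + 1) (hpq : p < q)
    (hq : q < l.length) (hpar : (q - p) % 2 = 1)
    (hbal' : same' - diff' = 2 * (((l.drop p).take (q + 1 - p)).count x : Int) - ((q : Int) + 1 - p))
    (hf : l.length < q + 2 + f) :
    segLoop x same' diff' (l.drop (q + 1)) = l.drop (scanQ l x l.length p f (q + 3)) := by
  by_cases hq1 : q + 1 < l.length
  · rw [List.drop_eq_getElem_cons hq1]
    have hcnt2 := cnt_ext l x p (q + 1) (by omega) hq1
    by_cases hvx2 : l[q + 1] = x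
    · rw [if_pos hvx2] at hcnt2
      rw [segLoop_cons_match x _ same' diff' _ hvx2, if_neg (by omega)]
      have := ih (q + 2) (same' + 1) diff' f (by omega) (by omega) (by omega) (by omega)
        (by rw [show q + 2 - p = q + 1 + 1 - p by omega, hcnt2]; push_cast; omega) (by omega)
      rw [show q + 2 + 1 = q + 3 by omega] at this
      exact this
    · rw [if_neg hvx2] at hcnt2
      rw [segLoop_cons_mismatch x _ same' diff' _ hvx2, if_neg (by omega)]
      have := ih (q + 2) same' (diff' + 1) f (by omega) (by omega) (by omega) (by omega)
        (by rw [show q + 2 - p = q + 1 + 1 - p by omega, hcnt2]; push_cast; omega) (by omega)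
      rw [show q + 2 + 1 = q + 3 by omega] at this
      exact this
  · have hq1e : q + 1 = l.length := by omega
    rw [hq1e, List.drop_length]
    cases f with
    | zero => rw [scanQ, List.drop_length]; simp [segLoop]
    | succ f => rw [scanQ, if_neg (by omega), List.drop_length]; simp [segLoop]

-- scanQ vs segLoop: at odd offset q - p, with same - diff equal to the window balance,
-- segLoop consumes exactly up to the endpoint scanQ finds (fuel large enough to reach it)
theorem seg_scan (l : List Char) (x : Char) (p : Nat) :
    ∀ k q (same diff : Int) fuel, l.length - q ≤ k → p < q → q ≤ l.length → (q - p) % 2 = 1 →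
      same - diff = 2 * (((l.drop p).take (q - p)).count x : Int) - ((q : Int) - p) →
      l.length < q + fuel →
      segLoop x same diff (l.drop q) = l.drop (scanQ l x l.length p fuel (q + 1)) := by
  intro k
  induction k with
  | zero =>
    intro q same diff fuel hk hpq hqn _ _ _
    have hq : q = l.length := by omega
    subst hq
    rw [List.drop_length]
    cases fuel with
    | zero => rw [scanQ, List.drop_length]; simp [segLoop]
    | succ fuel => rw [scanQ, if_neg (by omega), List.drop_length]; simp [segLoop]
  | succ k ih =>
    intro q same diff fuel hk hpq hqn hpar hbal hfuel
    by_cases hq : q < l.length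
    · obtain ⟨f, rfl⟩ : ∃ f, fuel = f + 1 := ⟨fuel - 1, by omega⟩
      rw [List.drop_eq_getElem_cons hq]
      have hcnt1 := cnt_ext l x p q (by omega) hq
      rw [scanQ, if_pos (by omega : q + 1 ≤ l.length)]
      by_cases hvx : l[q] = x
      · rw [segLoop_cons_match x _ same diff _ hvx]
        rw [if_pos hvx] at hcnt1
        have hcond : (2 * (((l.drop p).take (q + 1 - p)).count x) = q + 1 - p) ↔ same + 1 = diff := by
          constructor <;> intro h <;> omega
        by_cases hbrk : same + 1 = diff
        · rw [if_pos hbrk, if_pos (hcond.mpr hbrk)]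
        · rw [if_neg hbrk, if_neg (fun h => hbrk (hcond.mp h))]
          have := seg_scan_even l x p k ih q (same + 1) diff f hk hpq hq hpar
            (by rw [hcnt1]; push_cast; omega) (by omega)
          rw [show q + 1 + 2 = q + 3 by omega]
          exact this
      · rw [segLoop_cons_mismatch x _ same diff _ hvx]
        rw [if_neg hvx] at hcnt1
        have hcond : (2 * (((l.drop p).take (q + 1 - p)).count x) = q + 1 - p) ↔ same = diff + 1 := by
          constructor <;> intro h <;> omega
        by_cases hbrk : same = diff + 1
        · rw [if_pos hbrk, if_pos (hcond.mpr hbrk)]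
        · rw [if_neg hbrk, if_neg (fun h => hbrk (hcond.mp h))]
          have := seg_scan_even l x p k ih q same (diff + 1) f hk hpq hq hpar
            (by rw [hcnt1]; push_cast; omega) (by omega)
          rw [show q + 1 + 2 = q + 3 by omega]
          exact this
    · have hq' : q = l.length := by omega
      subst hq'
      rw [List.drop_length]
      cases fuel with
      | zero => rw [scanQ, List.drop_length]; simp [segLoop]
      | succ fuel => rw [scanQ, if_neg (by omega), List.drop_length]; simp [segLoop]

-- outer correspondence: B's while loop counts outerB of the remaining suffix
theorem solveLoop_outerB (l : List Char) :
    ∀ f p (a : Int), l.length - p < f →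
      solveLoop l l.length f p a = a + outerB (l.drop p) := by
  intro f
  induction f with
  | zero => intro p a hk; omega
  | succ f ih =>
    intro p a hk
    by_cases hp : p < l.length
    · rw [solveLoop, if_pos hp]
      have hgetD : l.getD p ' ' = l[p] := by
        simp [List.getD_eq_getElem?_getD, List.getElem?_eq_getElem hp]
      rw [hgetD, List.drop_eq_getElem_cons hp, outerB]
      have hcnt : ((l.drop p).take (p + 1 - p)).count (l[p]) = 1 := by
        have h1 : (l.drop p).take 1 = [l[p]] := by
          rw [List.drop_eq_getElem_cons hp]; rfl
        rw [show p + 1 - p = 1 by omega, h1]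
        simp
      have hseg := seg_scan l (l[p]) p l.length (p + 1) 1 0 (l.length + 1) (by omega) (by omega)
        (by omega) (by omega) (by rw [hcnt]; push_cast; omega) (by omega)
      rw [show p + 1 + 1 = p + 2 by omega] at hseg
      rw [hseg]
      have hlb := scanQ_lb l (l[p]) l.length p (l.length + 1) (p + 2)
      rw [ih (scanQ l (l[p]) l.length p (l.length + 1) (p + 2)) (a + 1) (by omega)]
      ring
    · rw [solveLoop, if_neg hp, List.drop_eq_nil_of_le (by omega)]
      simp [outerB]

-- ===== VERDICT (by name: the statement is the Claim_ definition above) =====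
theorem solution_spec : Claim_equal_solution := by
  intro s _
  unfold Spec_solution solution solution_alt
  rw [solveLoop_outerB s.toList (s.toList.length + 1) 0 0 (by omega)]
  simpa using (foldA_outerB s.toList.length s.toList le_rfl).1 0 ' '
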